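-- pv_equiv track=rewrite | github.com/MatteoBett/JeffDeBrujin | bbuilder/streamkmers.py | stream_kmers
-- ===== SOURCE A (Python) =====
-- def encode_nucl(nucl : str):
--     """
--     Encode a nucleotide into a 2-bit integer.
--     Also encode its reverse complement
--     """
--     encoded = (ord(nucl) >> 1) & 0b11 # Extract the two bits of the ascii code that represent the nucleotide
--
--     return encoded
--
-- def stream_kmers(seq : str, k : int):
--     """
--     Provide a stream of the kmers for a given sequence.
--         - first loop: Add the first k-1 nucleotides to the first kmer and its reverse complement
--         - yield loop: Sliding window using bit-shift to encode the entire sequence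
--     """
--     singleton_encoder = encode_nucl
--
--     kmer = 0
--
--     for i in range(k-1):
--         nucl = singleton_encoder(seq[i])
--         kmer |= nucl << (2*(k-2-i))
--
--     mask = (1 << (2*(k-1))) - 1
--     for i in range(k-1, len(seq)):
--         nucl = singleton_encoder(seq[i])
--         kmer &= mask # Shift the kmer to make space for the new nucleotide
--         kmer <<= 2 # Add the new nucleotide to the kmer
--         kmer |= nucl # remove the rightmost nucleotide by side effect
--
--         yield kmer
-- ===== SOURCE B (Python) =====
-- def encode_nucl(nucl: str):
--     """Encode a nucleotide into a 2-bit integer."""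
--     return (ord(nucl) >> 1) & 0b11
--
--
-- def stream_kmers(seq: str, k: int):
--     """Stream the 2-bit encoded k-mers of seq: encode the whole sequence into one
--     big integer once, then extract each k-mer window by shift and mask."""
--     if k < 1:
--         raise ValueError("k must be a positive integer")
--     total = 0
--     for c in seq:
--         total = (total << 2) | encode_nucl(c)
--     mask = (1 << (2 * k)) - 1
--     n = len(seq)
--     for i in range(k - 1, n):
--         yield (total >> (2 * (n - 1 - i))) & mask
-- ===== Notes on version B (the rewrite author's own statement) =====
-- stated objective: alternative
-- what changed: Replaces A's rolling bit-window (prefix priming loop plus mask/shift state carried across iterations) with a one-pass encoding of the whole sequence into a single big integer followed by per-window shift-and-mask extraction.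
import Mathlib
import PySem

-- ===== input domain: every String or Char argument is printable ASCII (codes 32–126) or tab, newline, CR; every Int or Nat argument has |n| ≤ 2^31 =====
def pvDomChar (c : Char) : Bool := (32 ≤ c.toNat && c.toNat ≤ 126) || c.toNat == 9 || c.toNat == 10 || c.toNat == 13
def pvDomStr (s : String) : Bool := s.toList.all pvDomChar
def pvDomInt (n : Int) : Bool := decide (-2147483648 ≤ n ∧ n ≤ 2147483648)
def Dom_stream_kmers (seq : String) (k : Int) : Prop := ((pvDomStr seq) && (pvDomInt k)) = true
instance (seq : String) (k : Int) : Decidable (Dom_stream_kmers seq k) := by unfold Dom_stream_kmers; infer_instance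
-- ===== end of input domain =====

-- B replaces A's incremental rolling bit-window with encode-the-whole-sequence-once
-- into one integer plus shift-and-mask window extraction (same outputs; alternative algorithm).


-- ===== PORT A =====
-- encode_nucl: (ord(nucl) >> 1) & 0b11 ; the value is a small nonnegative int, tracked as Nat
def encodeNucl (c : Char) : Nat := (c.toNat >>> 1) &&& 3

-- literal port of A: priming loop over range(k-1), then the rolling mask/shift loop that yields.
-- kmer is a nonnegative Python int throughout, tracked as Nat; shift counts are nonnegative
-- wherever A returns (k ≥ 1), so `.toNat` on them is exact there.
def stream_kmers (seq : String) (k : Int) : List Int :=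
  let cs := seq.toList
  let kmer0 : Nat :=
    (PySem.List.pyRange 0 (k - 1) 1).foldl
      (fun km i => km ||| (encodeNucl (PySem.List.pyGetD cs i ' ') <<< (2 * (k - 2 - i)).toNat)) 0
  let mask : Nat := (1 <<< (2 * (k - 1)).toNat) - 1
  let st :=
    (PySem.List.pyRange (k - 1) (cs.length : Int) 1).foldl
      (fun (st : Nat × List Int) i =>
        let nucl := encodeNucl (PySem.List.pyGetD cs i ' ')
        let km := ((st.1 &&& mask) <<< 2) ||| nucl
        (km, st.2 ++ [(km : Int)]))
      (kmer0, [])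
  st.2

-- ===== PORT B =====
-- literal port of B: validate k, encode the whole sequence into one integer once,
-- then extract each window by shift and mask. total is a nonnegative Python int,
-- tracked as Nat; on k < 1 the Python raises ValueError (outside Pre_), the port returns [].
def stream_kmers_alt (seq : String) (k : Int) : List Int :=
  let cs := seq.toList
  if k < 1 then []
  else
    let total : Nat := cs.foldl (fun t c => (t <<< 2) ||| encodeNucl c) 0
    let mask : Nat := (1 <<< (2 * k).toNat) - 1
    (PySem.List.pyRange (k - 1) (cs.length : Int) 1).map
      (fun i => (((total >>> (2 * ((cs.length : Int) - 1 - i)).toNat) &&& mask : Nat) : Int))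

-- ===== PRECONDITION & SPEC =====
-- A raises ValueError when k ≤ 0 (negative shift building the mask) and IndexError when
-- len(seq) < k-1 (priming loop); Pre_ is exactly the inputs on which A returns normally.
def Pre_stream_kmers (seq : String) (k : Int) : Prop :=
  1 ≤ k ∧ k - 1 ≤ (seq.toList.length : Int)
instance (seq : String) (k : Int) : Decidable (Pre_stream_kmers seq k) := by
  unfold Pre_stream_kmers; infer_instance

def pvWitness_stream_kmers : String × Int := ("ACGTAC", 3)

def Spec_stream_kmers (seq : String) (k : Int) (out : List Int) : Prop := out = stream_kmers_alt seq k
instance (seq : String) (k : Int) (out : List Int) : Decidable (Spec_stream_kmers seq k out) := by unfold Spec_stream_kmers; infer_instance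

-- ===== CLAIM (what is proved, stated in full; the proofs are below) =====
def Claim_equal_stream_kmers : Prop := ∀ (seq : String) (k : Int), Dom_stream_kmers seq k → Pre_stream_kmers seq k → Spec_stream_kmers seq k (stream_kmers seq k)

-- ===== LEMMAS AND PROOFS =====

-- the MSB-first 2-bit value of the window of `len` characters of cs starting at index a
def win (cs : List Char) (a len : Nat) : Nat :=
  (List.range len).foldl (fun km t => km * 4 + encodeNucl (cs.getD (a + t) ' ')) 0

theorem encodeNucl_le (c : Char) : encodeNucl c ≤ 3 := Nat.and_le_right

theorem win_succ (cs : List Char) (a len : Nat) :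
    win cs a (len + 1) = win cs a len * 4 + encodeNucl (cs.getD (a + len) ' ') := by
  simp [win, List.range_succ]

theorem win_lt (cs : List Char) (a len : Nat) : win cs a len < 4 ^ len := by
  induction len with
  | zero => simp [win]
  | succ n ih =>
    rw [win_succ]
    have := encodeNucl_le (cs.getD (a + n) ' ')
    have : win cs a n * 4 + encodeNucl (cs.getD (a + n) ' ') < (win cs a n + 1) * 4 := by omega
    calc win cs a n * 4 + encodeNucl (cs.getD (a + n) ' ') < (win cs a n + 1) * 4 := this
      _ ≤ 4 ^ n * 4 := by have := ih; omega
      _ = 4 ^ (n + 1) := by ring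

theorem win_split (cs : List Char) (a l1 l2 : Nat) :
    win cs a (l1 + l2) = win cs a l1 * 4 ^ l2 + win cs (a + l1) l2 := by
  induction l2 with
  | zero => simp [win]
  | succ n ih =>
    rw [show l1 + (n + 1) = (l1 + n) + 1 from rfl, win_succ, ih, win_succ]
    have : a + l1 + n = a + (l1 + n) := by omega
    rw [this]; ring

theorem win_mod (cs : List Char) (a len : Nat) :
    win cs a (len + 1) % 4 ^ len = win cs (a + 1) len := by
  have h := win_split cs a 1 len
  rw [show (1 : Nat) + len = len + 1 from by omega] at h
  rw [h, Nat.mul_comm, Nat.mul_add_mod_self_left,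
    Nat.mod_eq_of_lt (win_lt cs (a + 1) len)]

-- shift-accumulate step as arithmetic
theorem step_or (km : Nat) (c : Char) : (km <<< 2) ||| encodeNucl c = km * 4 + encodeNucl c := by
  have h : encodeNucl c < 2 ^ 2 := by have := encodeNucl_le c; omega
  rw [← Nat.shiftLeft_add_eq_or_of_lt h, Nat.shiftLeft_eq]

theorem two_pow_double (m : Nat) : (2 : Nat) ^ (2 * m) = 4 ^ m := by
  rw [pow_mul]; norm_num

-- or of a high multiple with a low shifted 2-bit value is addition (disjoint bits)
theorem or_add_high (v e m : Nat) (he : e ≤ 3) :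
    (v * 4 ^ (m + 1)) ||| (e <<< (2 * m)) = v * 4 ^ (m + 1) + e * 4 ^ m := by
  have hp : (0 : Nat) < 2 ^ (2 * m) := Nat.two_pow_pos _
  have hb : e <<< (2 * m) < 2 ^ (2 * m + 2) := by
    rw [Nat.shiftLeft_eq, pow_add]
    have : e * 2 ^ (2 * m) < 4 * 2 ^ (2 * m) := by
      exact Nat.mul_lt_mul_of_lt_of_le (by omega) (le_refl _) hp
    calc e * 2 ^ (2 * m) < 4 * 2 ^ (2 * m) := this
      _ = 2 ^ (2 * m) * 2 ^ 2 := by ring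
  have hpow : (2 : Nat) ^ (2 * m + 2) = 4 ^ (m + 1) := by
    rw [pow_add, two_pow_double]; ring
  have ha : v * 4 ^ (m + 1) = v <<< (2 * m + 2) := by
    rw [Nat.shiftLeft_eq, hpow]
  rw [ha, ← Nat.shiftLeft_add_eq_or_of_lt hb, Nat.shiftLeft_eq e, two_pow_double, ← ha]

-- win only looks at the window, so appending a character on the right does not change it
theorem win_append (cs : List Char) (c : Char) (a len : Nat) (h : a + len ≤ cs.length) :
    win (cs ++ [c]) a len = win cs a len := by
  induction len with
  | zero => simp [win]
  | succ n ih =>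
    rw [win_succ, win_succ, ih (by omega)]
    congr 2
    rw [List.getD_append _ _ _ _ (by omega)]

-- B's one-pass encoding of the whole sequence is the full-length window value
theorem foldl_total (cs : List Char) :
    cs.foldl (fun t c => (t <<< 2) ||| encodeNucl c) 0 = win cs 0 cs.length := by
  induction cs using List.reverseRecOn with
  | nil => simp [win]
  | append_singleton ys c ih =>
    rw [List.foldl_append, List.foldl_cons, List.foldl_nil, step_or, ih]
    rw [List.length_append, List.length_singleton, win_succ, win_append ys c 0 ys.length (by omega)]
    congr 2
    simp

-- A's priming loop invariant: after the range(t) prefix, kmer = win cs 0 t * 4^(K-t)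
theorem prime_fold (cs : List Char) (K : Nat) (k : Int) (hk : k - 1 = (K : Int)) :
    ∀ t : Nat, t ≤ K →
    ((List.range t).map (fun u => ((u : Nat) : Int))).foldl
      (fun km i => km ||| (encodeNucl (PySem.List.pyGetD cs i ' ') <<< (2 * (k - 2 - i)).toNat)) 0
      = win cs 0 t * 4 ^ (K - t) := by
  intro t ht
  induction t with
  | zero => simp [win]
  | succ n ih =>
    have hn : n ≤ K := by omega
    rw [List.range_succ, List.map_append, List.foldl_append, ih hn]
    simp only [List.map_cons, List.map_nil, List.foldl_cons, List.foldl_nil]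
    have hsh : (2 * (k - 2 - (n : Int))).toNat = 2 * (K - 1 - n) := by omega
    rw [hsh, PySem.List.pyGetD_natCast]
    have hKn : K - n = (K - 1 - n) + 1 := by omega
    rw [hKn, or_add_high _ _ _ (encodeNucl_le _), win_succ]
    have hKn2 : K - (n + 1) = K - 1 - n := by omega
    rw [hKn2]
    simp only [Nat.zero_add]
    ring

-- A's rolling loop, unrolled over the remaining iterations
theorem roll_fold (cs : List Char) (K : Nat) :
    ∀ (m s : Nat) (km : Nat) (out : List Int), km % 4 ^ K = win cs s K →
    (((List.range m).map (fun t => ((s + K + t : Nat) : Int))).foldl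
      (fun (st : Nat × List Int) i =>
        let nucl := encodeNucl (PySem.List.pyGetD cs i ' ')
        let km := ((st.1 &&& ((1 <<< (2 * K)) - 1)) <<< 2) ||| nucl
        (km, st.2 ++ [(km : Int)]))
      (km, out)).2
      = out ++ (List.range m).map (fun t => ((win cs (s + t) (K + 1) : Nat) : Int)) := by
  intro m
  induction m with
  | zero => intro s km out h; simp
  | succ n ih =>
    intro s km out h
    rw [List.range_succ_eq_map]
    simp only [List.map_cons, List.foldl_cons, List.map_map, Function.comp_def,
      Nat.succ_eq_add_one, Nat.add_zero, PySem.List.pyGetD_natCast]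
    have hmask : (1 <<< (2 * K)) - 1 = 2 ^ (2 * K) - 1 := by rw [Nat.shiftLeft_eq]; simp
    have hstep : ((km &&& ((1 <<< (2 * K)) - 1)) <<< 2) ||| encodeNucl (cs.getD (s + K) ' ')
        = win cs s (K + 1) := by
      rw [hmask, Nat.and_two_pow_sub_one_eq_mod, step_or, two_pow_double, h, ← win_succ]
    rw [hstep]
    have hnext : win cs s (K + 1) % 4 ^ K = win cs (s + 1) K := win_mod cs s K
    have hfun : (fun t : Nat => ((s + K + (t + 1) : Nat) : Int))
        = (fun t : Nat => (((s + 1) + K + t : Nat) : Int)) := by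
      funext t; congr 1; omega
    rw [show ((List.range n).map fun t => ((s + K + (t + 1) : Nat) : Int))
          = ((List.range n).map fun t => (((s + 1) + K + t : Nat) : Int)) by rw [hfun]]
    rw [ih (s + 1) (win cs s (K + 1)) (out ++ [((win cs s (K + 1) : Nat) : Int)]) hnext]
    simp only [List.append_assoc, List.singleton_append]
    rw [show (fun t : Nat => ((win cs (s + 1 + t) (K + 1) : Nat) : Int))
          = (fun x : Nat => ((win cs (s + (x + 1)) (K + 1) : Nat) : Int)) from by
      funext t; congr 2; omega]

-- B's output as a map over window starts
theorem alt_eq_map (seq : String) (k : Int) (K : Nat) (hk : k - 1 = (K : Int))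
    (hK : K ≤ seq.toList.length) :
    stream_kmers_alt seq k
      = (List.range (seq.toList.length - K)).map
          (fun t => ((win seq.toList t (K + 1) : Nat) : Int)) := by
  simp only [stream_kmers_alt]
  set cs := seq.toList with hcs
  rw [if_neg (by omega : ¬ k < 1)]
  rw [PySem.List.pyRange_one (k - 1) (cs.length : Int), hk]
  have hlen : ((cs.length : Int) - (K : Int)).toNat = cs.length - K := by omega
  rw [hlen, List.map_map]
  apply List.map_congr_left
  intro t ht
  have ht' : t < cs.length - K := List.mem_range.mp ht
  simp only [Function.comp_apply]
  congr 1
  have hm : (2 * k).toNat = 2 * (K + 1) := by omega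
  have hsh : (2 * ((cs.length : Int) - 1 - ((K : Int) + (t : Int)))).toNat
      = 2 * (cs.length - 1 - (K + t)) := by omega
  rw [hm, hsh, foldl_total]
  set n := cs.length with hn
  set m := n - 1 - (K + t) with hmdef
  have hmask : (1 <<< (2 * (K + 1))) - 1 = 2 ^ (2 * (K + 1)) - 1 := by rw [Nat.shiftLeft_eq]; simp
  rw [hmask, Nat.and_two_pow_sub_one_eq_mod, Nat.shiftRight_eq_div_pow, two_pow_double,
    two_pow_double]
  have hsplit1 : n = (t + (K + 1)) + m := by omega
  rw [hsplit1, win_split cs 0 (t + (K + 1)) m]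
  simp only [Nat.zero_add]
  rw [Nat.add_comm (win cs 0 (t + (K + 1)) * 4 ^ m) (win cs (t + (K + 1)) m),
    Nat.add_mul_div_right _ _ (Nat.pos_of_ne_zero (by positivity)),
    Nat.div_eq_of_lt (win_lt cs (t + (K + 1)) m), Nat.zero_add]
  rw [win_split cs 0 t (K + 1)]
  simp only [Nat.zero_add]
  rw [Nat.add_comm (win cs 0 t * 4 ^ (K + 1)) (win cs t (K + 1)), Nat.add_mul_mod_self_right,
    Nat.mod_eq_of_lt (win_lt cs t (K + 1))]

-- ===== VERDICT (by name: the statement is the Claim_ definition above) =====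
theorem stream_kmers_spec : Claim_equal_stream_kmers := by
  intro seq k _ hpre
  obtain ⟨hk1, hk2⟩ := hpre
  unfold Spec_stream_kmers
  set cs := seq.toList with hcs
  set K : Nat := (k - 1).toNat with hKdef
  have hk : k - 1 = (K : Int) := by omega
  have hK : K ≤ cs.length := by omega
  rw [alt_eq_map seq k K hk hK]
  simp only [stream_kmers]
  rw [← hcs]
  rw [PySem.List.pyRange_one 0 (k - 1), hk]
  simp only [Int.sub_zero, Int.toNat_natCast, Int.zero_add]
  have hprime := prime_fold cs K k hk K (le_refl K)
  simp only [Nat.sub_self, pow_zero, Nat.mul_one] at hprime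
  rw [hprime]
  rw [PySem.List.pyRange_one ((K : Nat) : Int) (cs.length : Int)]
  have hlen : ((cs.length : Int) - (K : Int)).toNat = cs.length - K := by omega
  rw [hlen]
  have hm : (2 * ((K : Nat) : Int)).toNat = 2 * K := by omega
  rw [hm]
  rw [show (fun t : Nat => ((K : Int) + (t : Int))) = (fun t : Nat => ((0 + K + t : Nat) : Int)) from by
    funext t; push_cast; omega]
  have hmod : win cs 0 K % 4 ^ K = win cs 0 K := Nat.mod_eq_of_lt (win_lt cs 0 K)
  rw [roll_fold cs K (cs.length - K) 0 (win cs 0 K) [] hmod]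
  simp only [List.nil_append, Nat.zero_add]
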